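-- pv_equiv track=rewrite | github.com/nelsonkrisanto/Nelson-Dissertation | scripts/Future/analyze_primers _pcrprierms.py | check_primer_conditions
-- ===== SOURCE A (Python) =====
-- from itertools import groupby
--
-- def calculate_gc_content(sequence):
--     return round((sequence.count('G') + sequence.count('C')) / len(sequence) * 100, 2)
--
-- def check_primer_conditions(primer):
--     length = len(primer['Sequence'])
--     gc_content = calculate_gc_content(primer['Sequence'])
--     homopolymer_run = max([len(list(g)) for k, g in groupby(primer['Sequence'])])
--     if length < 18 or length > 25:
--         return False
--     if gc_content < 40 or gc_content > 60:
--         return False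
--     if homopolymer_run > 4:
--         return False
--     return True
-- ===== SOURCE B (Python) =====
-- def _has_run5(seq):
--     # does the sequence contain 5 identical consecutive characters?
--     if len(seq) < 5:
--         return False
--     if seq[0] == seq[1] == seq[2] == seq[3] == seq[4]:
--         return True
--     return _has_run5(seq[1:])
--
-- def check_primer_conditions(primer):
--     seq = primer['Sequence']
--     n = len(seq)
--     if not (18 <= n <= 25):
--         return False
--     gc_count = 0
--     for base in seq:
--         if base == 'G' or base == 'C':
--             gc_count += 1
--     # exact integer cross-multiplication: 40 <= 100*gc_count/n <= 60, no float, no rounding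
--     if not (40 * n <= 100 * gc_count <= 60 * n):
--         return False
--     return not _has_run5(seq)
-- ===== Notes on version B (the rewrite author's own statement) =====
-- stated objective: alternative
-- what changed: B tests the length first and returns immediately on wrong-length primers, replaces the rounded GC percentage round(gc/n*100,2) by the exact integer cross-multiplication 40*n <= 100*gc <= 60*n (no division, no rounding), and replaces the groupby max-run computation by a recursive sliding-window test for 5 identical consecutive characters.
import Mathlib
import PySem

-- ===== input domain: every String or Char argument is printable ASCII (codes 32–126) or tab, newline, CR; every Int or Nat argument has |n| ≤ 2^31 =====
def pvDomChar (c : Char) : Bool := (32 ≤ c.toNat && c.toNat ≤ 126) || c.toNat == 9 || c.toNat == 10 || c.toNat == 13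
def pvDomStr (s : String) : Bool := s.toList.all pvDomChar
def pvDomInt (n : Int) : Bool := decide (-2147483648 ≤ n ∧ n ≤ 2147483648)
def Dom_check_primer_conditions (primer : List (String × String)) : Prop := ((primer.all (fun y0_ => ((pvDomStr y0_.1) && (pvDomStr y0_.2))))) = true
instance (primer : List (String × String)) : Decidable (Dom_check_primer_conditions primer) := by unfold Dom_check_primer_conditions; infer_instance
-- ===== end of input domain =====

-- B checks length first (constant time on wrong-length primers), replaces the rounded GC
-- percentage by an exact integer cross-multiplication 40*n ≤ 100*gc ≤ 60*n, and replaces the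
-- groupby max-run computation by a sliding-window test for 5 identical consecutive characters.

-- ===== PORT A =====
-- round(x, 2) of the exact rational (num*100)/den, returned as an Int number of HUNDREDTHS
-- (round-half-even on the exact rational). Hand port of Python's float round(·, 2): on this Bool-valued
-- task the result only feeds the comparisons with 40 and 60 (here 4000/6000 hundredths), where the
-- exact rational rounding and CPython's float rounding agree.
def pvRound2 (num den : Int) : Int :=
  if den = 0 then 0  -- ZeroDivisionError in Python; excluded by Pre_
  else
    let n := num * 10000
    let q := PySem.Int.floordiv n den
    let r := n - q * den
    if 2 * r < den then q
    else if den < 2 * r then q + 1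
    else if q % 2 = 0 then q else q + 1

-- calculate_gc_content, with the float result represented in hundredths
def calculate_gc_content (s : String) : Int :=
  pvRound2 ((PySem.Str.count s "G" : Int) + (PySem.Str.count s "C" : Int)) (PySem.Str.len s)

-- [len(list(g)) for k, g in groupby(seq)] : left-to-right grouping of adjacent equal chars,
-- carrying the current group's char and length (faithful to itertools.groupby)
def pvGroupLens (p : Char) (c : Int) : List Char → List Int
  | [] => [c]
  | x :: xs => if x = p then pvGroupLens p (c + 1) xs else c :: pvGroupLens x 1 xs

def check_primer_conditions (primer : List (String × String)) : Bool :=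
  let seq := ((PySem.Dict.mk primer).get? "Sequence").getD ""  -- KeyError (no 'Sequence') excluded by Pre_
  let length : Int := PySem.Str.len seq
  let gc_content := calculate_gc_content seq
  let homopolymer_run : Int :=
    match seq.toList with
    | [] => 0  -- max([]) raises ValueError in Python (unreachable: ZeroDivisionError hits first); excluded by Pre_
    | c :: cs => (pvGroupLens c 1 cs).foldl max 0
  if length < 18 ∨ length > 25 then false
  else if gc_content < 4000 ∨ gc_content > 6000 then false
  else if homopolymer_run > 4 then false
  else true

-- ===== PORT B =====
-- _has_run5: `if len(seq) < 5: return False / if seq[0]==seq[1]==seq[2]==seq[3]==seq[4]: return True / return _has_run5(seq[1:])`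
def pvWin5 : List Char → Bool
  | a :: b :: c :: d :: e :: rest => (a == b && a == c && a == d && a == e) || pvWin5 (b :: c :: d :: e :: rest)
  | _ => false

def check_primer_conditions_alt (primer : List (String × String)) : Bool :=
  let seq := ((PySem.Dict.mk primer).get? "Sequence").getD ""  -- KeyError excluded by Pre_
  let n : Int := PySem.Str.len seq
  if ¬ (18 ≤ n ∧ n ≤ 25) then false
  else
    let gc : Int := seq.toList.foldl (fun a b => if b = 'G' ∨ b = 'C' then a + 1 else a) 0
    if ¬ (40 * n ≤ 100 * gc ∧ 100 * gc ≤ 60 * n) then false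
    else !(pvWin5 seq.toList)

-- ===== PRECONDITION & SPEC =====
-- Pre_ excludes exactly the inputs where A raises: a missing 'Sequence' key (KeyError) or an
-- empty sequence (ZeroDivisionError in calculate_gc_content).
def Pre_check_primer_conditions (primer : List (String × String)) : Prop :=
  ((PySem.Dict.mk primer).get? "Sequence").getD "" ≠ ""
instance (primer : List (String × String)) : Decidable (Pre_check_primer_conditions primer) := by unfold Pre_check_primer_conditions; infer_instance

def pvWitness_check_primer_conditions : (List (String × String)) := [("Sequence", "ATGCATGCATGCATGCAT")]

def Spec_check_primer_conditions (primer : List (String × String)) (out : Bool) : Prop := out = check_primer_conditions_alt primer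
instance (primer : List (String × String)) (out : Bool) : Decidable (Spec_check_primer_conditions primer out) := by unfold Spec_check_primer_conditions; infer_instance

-- ===== CLAIM (what is proved, stated in full; the proofs are below) =====
def Claim_equal_check_primer_conditions : Prop := ∀ (primer : List (String × String)), Dom_check_primer_conditions primer → Pre_check_primer_conditions primer → Spec_check_primer_conditions primer (check_primer_conditions primer)
-- ===== LEMMAS AND PROOFS =====

-- the longest homopolymer run of l when the current run has char p and length c
def pvMrf (p : Char) (c : Int) : List Char → Int
  | [] => c
  | x :: xs => if x = p then pvMrf p (c + 1) xs else max c (pvMrf x 1 xs)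

theorem pvMrf_le (xs : List Char) : ∀ (p : Char) (c : Int), c ≤ pvMrf p c xs := by
  induction xs with
  | nil => intro p c; simp [pvMrf]
  | cons x xs ih =>
    intro p c
    simp only [pvMrf]
    split
    · exact le_trans (by omega) (ih p (c + 1))
    · exact le_max_left _ _

theorem foldl_max_pvGroupLens (xs : List Char) :
    ∀ (p : Char) (c a : Int), (pvGroupLens p c xs).foldl max a = max a (pvMrf p c xs) := by
  induction xs with
  | nil => intro p c a; simp [pvGroupLens, pvMrf]
  | cons x xs ih =>
    intro p c a
    simp only [pvGroupLens, pvMrf]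
    split
    · exact ih p (c + 1) a
    · simp only [List.foldl_cons, ih x 1 (max a c)]
      rw [max_assoc]

-- count.go with a single-character needle counts that character (fuel ≥ remaining length)
theorem pvCountGo_single (c : Char) (fuel : Nat) :
    ∀ (l : List Char) (acc : Nat), l.length ≤ fuel →
      PySem.Chars.count.go [c] fuel l acc = acc + l.count c := by
  induction fuel with
  | zero =>
    intro l acc h
    have : l = [] := by cases l <;> simp_all
    subst this; simp [PySem.Chars.count.go]
  | succ n ih =>
    intro l acc h
    cases l with
    | nil => simp [PySem.Chars.count.go]
    | cons x xs =>
      by_cases hx : c = x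
      · subst hx
        have hpre : [c].isPrefixOf (c :: xs) = true := by simp [List.isPrefixOf]
        simp only [PySem.Chars.count.go, hpre, if_true, List.length_cons, List.length_nil,
          List.drop_succ_cons, List.drop_zero]
        rw [ih xs (acc + 1) (by simpa using h), List.count_cons_self]
        omega
      · have hpre : [c].isPrefixOf (x :: xs) = false := by simp [List.isPrefixOf, hx]
        simp only [PySem.Chars.count.go, hpre, Bool.false_eq_true, if_false]
        rw [ih xs acc (by simpa using h)]
        have hxc : (x == c) = false := by simpa using Ne.symm hx
        simp [List.count_cons, hxc]

theorem pvCount_single (s : List Char) (c : Char) :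
    PySem.Chars.count s [c] = s.count c := by
  have h := pvCountGo_single c s.length s 0 le_rfl
  simpa [PySem.Chars.count] using h

theorem pvCountP_GC (l : List Char) :
    (l.countP (fun ch => ch == 'G' || ch == 'C') : Int) =
      (l.count 'G' : Int) + (l.count 'C' : Int) := by
  induction l with
  | nil => simp
  | cons x xs ih =>
    simp only [List.countP_cons, List.count_cons]
    by_cases hg : x = 'G'
    · simp [hg, ih]; omega
    · by_cases hc : x = 'C'
      · simp [hc, ih]; omega
      · have h1 : (x == 'G') = false := by simpa using hg
        have h2 : (x == 'C') = false := by simpa using hc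
        simp [h1, h2, ih]

-- B's GC loop counts the G/C characters
theorem pvGCfold (l : List Char) :
    ∀ (a : Int), l.foldl (fun a b => if b = 'G' ∨ b = 'C' then a + 1 else a) a
      = a + (l.countP (fun ch => ch == 'G' || ch == 'C') : Int) := by
  induction l with
  | nil => intro a; simp
  | cons x xs ih =>
    intro a
    simp only [List.foldl_cons, ih, List.countP_cons]
    by_cases h : x = 'G' ∨ x = 'C'
    · have hb : (x == 'G' || x == 'C') = true := by rcases h with h | h <;> simp [h]
      simp [h, hb]; omega
    · have hb : (x == 'G' || x == 'C') = false := by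
        rw [not_or] at h; simp [h.1, h.2]
      simp [h, hb]

-- inside the length window 18..25, rounding to hundredths agrees with cross-multiplication
theorem pvRound2_iff (L g : Int) (h1 : 18 ≤ L) (h2 : L ≤ 25) (h3 : 0 ≤ g) (h4 : g ≤ L) :
    ((4000 ≤ pvRound2 g L ∧ pvRound2 g L ≤ 6000) ↔ (40 * L ≤ 100 * g ∧ 100 * g ≤ 60 * L)) := by
  interval_cases L <;> interval_cases g <;> decide

-- windows of a pure run and run-peeling, via the unfolding equations of pvWin5
theorem pvWin5_peel (a b c d e : Char) (r : List Char) :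
    pvWin5 (a :: b :: c :: d :: e :: r)
      = ((a == b && a == c && a == d && a == e) || pvWin5 (b :: c :: d :: e :: r)) := rfl
theorem pvWin5_nil : pvWin5 [] = false := rfl
theorem pvWin5_one (a : Char) : pvWin5 [a] = false := rfl
theorem pvWin5_two (a b : Char) : pvWin5 [a, b] = false := rfl
theorem pvWin5_three (a b c : Char) : pvWin5 [a, b, c] = false := rfl
theorem pvWin5_four (a b c d : Char) : pvWin5 [a, b, c, d] = false := rfl

-- a run of length k contains a 5-window iff 5 <= k
theorem pvWin5_replicate (p : Char) : ∀ (k : Nat), pvWin5 (List.replicate k p) = decide (5 ≤ k) := by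
  intro k
  match k with
  | 0 => simp [pvWin5_nil]
  | 1 => simp [List.replicate, pvWin5_one]
  | 2 => simp [List.replicate, pvWin5_two]
  | 3 => simp [List.replicate, pvWin5_three]
  | 4 => simp [List.replicate, pvWin5_four]
  | (n + 5) => simp [List.replicate, pvWin5_peel]

-- peeling a run of p's in front of a different character x
theorem pvWin5_rep_cons (p x : Char) (hne : x ≠ p) :
    ∀ (k : Nat) (ys : List Char),
      pvWin5 (List.replicate k p ++ x :: ys) = (decide (5 ≤ k) || pvWin5 (x :: ys)) := by
  intro k
  have hpx : (p == x) = false := by simpa using Ne.symm hne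
  induction k with
  | zero => intro ys; simp
  | succ k ih =>
    intro ys
    match k, ys with
    | 0, [] => simp [List.replicate, pvWin5_one, pvWin5_two]
    | 0, [y1] => simp [List.replicate, pvWin5_two, pvWin5_three]
    | 0, [y1, y2] => simp [List.replicate, pvWin5_three, pvWin5_four]
    | 0, y1 :: y2 :: y3 :: ys =>
      simp [List.replicate, pvWin5_peel, hpx]
    | 1, [] => simp [List.replicate, pvWin5_three, pvWin5_one]
    | 1, [y1] => simp [List.replicate, pvWin5_four, pvWin5_two]
    | 1, y1 :: y2 :: ys =>
      have h := ih (y1 :: y2 :: ys)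
      simp [List.replicate, pvWin5_peel, hpx] at h ⊢
      exact h
    | 2, [] => simp [List.replicate, pvWin5_four, pvWin5_one]
    | 2, y1 :: ys =>
      have h := ih (y1 :: ys)
      simp [List.replicate, pvWin5_peel, hpx] at h ⊢
      exact h
    | 3, ys =>
      have h := ih ys
      simp [List.replicate, pvWin5_peel, hpx] at h ⊢
      exact h
    | (n + 4), ys =>
      simp [List.replicate, List.cons_append, pvWin5_peel]

-- main bridge: the groupby max-run reaches 5 iff a 5-window of identical chars exists
theorem pvMrf_iff_win5 (xs : List Char) :
    ∀ (k : Nat) (p : Char), 1 ≤ k →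
      (5 ≤ pvMrf p (k : Int) xs ↔ pvWin5 (List.replicate k p ++ xs) = true) := by
  induction xs with
  | nil =>
    intro k p _
    simp only [pvMrf, List.append_nil, pvWin5_replicate]
    constructor
    · intro h; simp; omega
    · intro h; simp at h; omega
  | cons x xs ih =>
    intro k p hk
    by_cases hxp : x = p
    · subst hxp
      have hlist : List.replicate k x ++ x :: xs = List.replicate (k + 1) x ++ xs := by
        rw [List.replicate_succ' (n := k)]; simp
      have := ih (k + 1) x (by omega)
      simp only [pvMrf, if_pos, hlist]
      have hcast : ((k : Int) + 1) = ((k + 1 : Nat) : Int) := by push_cast; ring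
      rw [hcast]
      exact this
    · have := ih 1 x le_rfl
      simp only [List.replicate_one, List.singleton_append] at this
      simp only [pvMrf, if_neg hxp, pvWin5_rep_cons p x hxp k xs]
      constructor
      · intro h
        rcases le_max_iff.mp h with h | h
        · simp; left; omega
        · simp only [Bool.or_eq_true]; right; exact this.mp h
      · intro h
        rcases Bool.or_eq_true _ _ |>.mp h with h | h
        · have : 5 ≤ k := by simpa using h
          exact le_max_of_le_left (by omega)
        · exact le_max_of_le_right (this.mpr h)

-- ===== VERDICT (by name: the statement is the Claim_ definition above) =====
theorem check_primer_conditions_spec : Claim_equal_check_primer_conditions := by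
  intro primer _ hpre
  unfold Spec_check_primer_conditions check_primer_conditions check_primer_conditions_alt
  unfold Pre_check_primer_conditions at hpre
  set s : String := ((PySem.Dict.mk primer).get? "Sequence").getD "" with hs
  have hnil : s.toList ≠ [] := fun h => hpre (String.toList_eq_nil_iff.mp h)
  obtain ⟨c, cs, hcons⟩ : ∃ c cs, s.toList = c :: cs := by
    cases h : s.toList with
    | nil => exact absurd h hnil
    | cons c cs => exact ⟨c, cs, rfl⟩
  have hlen : PySem.Str.len s = ((c :: cs).length : Int) := by
    rw [PySem.Str.len_eq, hcons]
  set gc : Int := (PySem.Str.count s "G" : Int) + (PySem.Str.count s "C" : Int) with hgcdef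
  have hG : PySem.Str.count s "G" = s.toList.count 'G' := by
    rw [PySem.Str.count_eq]; exact pvCount_single _ _
  have hC : PySem.Str.count s "C" = s.toList.count 'C' := by
    rw [PySem.Str.count_eq]; exact pvCount_single _ _
  have hcountP : (s.toList.countP (fun ch => ch == 'G' || ch == 'C') : Int) = gc := by
    rw [pvCountP_GC, hgcdef, hG, hC]
  -- B's GC loop computes the same integer gc
  have hgcB : (c :: cs).foldl (fun a b => if b = 'G' ∨ b = 'C' then a + 1 else a) 0 = gc := by
    rw [← hcons, pvGCfold, hcountP]; ring
  have hcalc : calculate_gc_content s = pvRound2 gc ((c :: cs).length : Int) := by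
    unfold calculate_gc_content; rw [hlen, ← hgcdef]
  have hgc0 : 0 ≤ gc := by rw [hgcdef]; positivity
  have hgcle : gc ≤ ((c :: cs).length : Int) := by
    rw [← hcountP, ← hcons]
    exact_mod_cast List.countP_le_length
  set L : Int := ((c :: cs).length : Int) with hL
  simp only [hcons, hlen, hcalc, hgcB]
  by_cases h1 : 18 ≤ L ∧ L ≤ 25
  · rw [if_neg (show ¬(L < 18 ∨ L > 25) by omega),
        if_neg (show ¬¬(18 ≤ L ∧ L ≤ 25) by simpa using h1)]
    have hround := pvRound2_iff L gc h1.1 h1.2 hgc0 hgcle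
    by_cases h2 : 40 * L ≤ 100 * gc ∧ 100 * gc ≤ 60 * L
    · have h4 := hround.mpr h2
      rw [if_neg (show ¬(pvRound2 gc L < 4000 ∨ pvRound2 gc L > 6000) by omega),
          if_neg (show ¬¬(40 * L ≤ 100 * gc ∧ 100 * gc ≤ 60 * L) by simpa using h2)]
      -- homopolymer run vs sliding window
      have hm := pvMrf_iff_win5 cs 1 c le_rfl
      simp only [List.replicate_one, List.singleton_append, Nat.cast_one] at hm
      have hfold : (pvGroupLens c 1 cs).foldl max 0 = pvMrf c 1 cs := by
        rw [foldl_max_pvGroupLens]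
        have := pvMrf_le cs c 1
        omega
      rw [hfold]
      by_cases hw : pvWin5 (c :: cs) = true
      · rw [if_pos (show pvMrf c 1 cs > 4 by have := hm.mpr hw; omega), hw]; rfl
      · have h5 : ¬ 5 ≤ pvMrf c 1 cs := fun h => hw (hm.mp h)
        rw [if_neg (show ¬(pvMrf c 1 cs > 4) by omega)]
        simp only [Bool.not_eq_true] at hw
        rw [hw]; rfl
    · have h4 : ¬ (4000 ≤ pvRound2 gc L ∧ pvRound2 gc L ≤ 6000) :=
        fun h => h2 (hround.mp h)
      rw [if_pos (show pvRound2 gc L < 4000 ∨ pvRound2 gc L > 6000 by omega),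
          if_pos (show ¬(40 * L ≤ 100 * gc ∧ 100 * gc ≤ 60 * L) from h2)]
  · rw [if_pos (show L < 18 ∨ L > 25 by omega),
        if_pos (show ¬(18 ≤ L ∧ L ≤ 25) from h1)]
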